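-- pv_equiv track=rewrite | github.com/maciekk/NoobRL | input_handlers.py | _build_display_lines
-- ===== SOURCE A (Python) =====
-- def _build_display_lines(monsters, corpses, items_sorted, features) -> list:
--     """Build display strings from sorted entity and feature collections."""
--     lines: list[str] = []
--     if monsters:
--         lines.append("Monsters:")
--         lines.extend(f"  {name} {d}" for _, name, d in monsters)
--     if corpses:
--         if lines:
--             lines.append("")
--         lines.append("Corpses:")
--         lines.extend(f"  {name} {d}" for _, name, d in corpses)
--     if items_sorted:
--         if lines:
--             lines.append("")
--         lines.append("Items:")
--         lines.extend(f"  {name} {d}" for _, name, d in items_sorted)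
--     if features:
--         if lines:
--             lines.append("")
--         lines.append("Features:")
--         lines.extend(f"  {feat}" for _, feat in features)
--     if not lines:
--         lines.append("Nothing of interest.")
--     return lines
-- ===== SOURCE B (Python) =====
-- def _build_display_lines(monsters, corpses, items_sorted, features) -> list:
--     """Build display strings from sorted entity and feature collections."""
--     def rec(sections):
--         # back-to-front recursion: a block is followed by a blank line
--         # exactly when some later block exists (rest non-empty)
--         if not sections:
--             return []
--         heading, rows = sections[0]
--         rest = rec(sections[1:])
--         if not rows:
--             return rest
--         return [heading] + rows + ([""] if rest else []) + rest
--     lines = rec([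
--         ("Monsters:", [f"  {name} {d}" for _, name, d in monsters]),
--         ("Corpses:", [f"  {name} {d}" for _, name, d in corpses]),
--         ("Items:", [f"  {name} {d}" for _, name, d in items_sorted]),
--         ("Features:", [f"  {feat}" for _, feat in features]),
--     ])
--     return lines if lines else ["Nothing of interest."]
-- ===== Notes on version B (the rewrite author's own statement) =====
-- stated objective: alternative
-- what changed: Replaces A's four unrolled if-blocks with their look-behind blank-line rule (insert '' when lines is already non-empty) by a back-to-front recursion over section descriptors whose look-ahead rule appends '' after a block exactly when a later block exists.
import Mathlib
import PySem

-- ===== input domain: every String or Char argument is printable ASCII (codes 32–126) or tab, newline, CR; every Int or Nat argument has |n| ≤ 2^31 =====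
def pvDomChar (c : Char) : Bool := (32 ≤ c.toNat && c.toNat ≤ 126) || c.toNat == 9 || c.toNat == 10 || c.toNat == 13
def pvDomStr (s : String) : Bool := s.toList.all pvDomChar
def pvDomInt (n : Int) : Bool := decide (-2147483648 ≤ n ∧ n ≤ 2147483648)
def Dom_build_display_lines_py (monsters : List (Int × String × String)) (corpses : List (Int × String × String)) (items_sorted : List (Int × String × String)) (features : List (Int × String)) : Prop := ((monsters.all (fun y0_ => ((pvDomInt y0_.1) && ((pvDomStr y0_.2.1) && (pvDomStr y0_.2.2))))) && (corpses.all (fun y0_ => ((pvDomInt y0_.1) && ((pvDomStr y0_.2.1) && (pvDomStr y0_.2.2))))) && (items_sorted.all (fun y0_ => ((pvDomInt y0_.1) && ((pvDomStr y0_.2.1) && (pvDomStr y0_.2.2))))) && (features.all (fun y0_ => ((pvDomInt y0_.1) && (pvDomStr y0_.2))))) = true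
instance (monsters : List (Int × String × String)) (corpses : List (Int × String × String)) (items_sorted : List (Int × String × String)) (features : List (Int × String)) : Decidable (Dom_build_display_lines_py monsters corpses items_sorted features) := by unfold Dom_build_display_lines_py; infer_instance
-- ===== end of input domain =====

-- B replaces A's four unrolled if-blocks by a back-to-front recursion over section descriptors (blank line appended after a block iff a later block exists): a different decomposition, same cost.


-- ===== PORT A =====
-- f"  {name} {d}"
def pvFmt3 (e : Int × String × String) : String := "  " ++ e.2.1 ++ " " ++ e.2.2
-- f"  {feat}"
def pvFmt2 (e : Int × String) : String := "  " ++ e.2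

def build_display_lines_py (monsters : List (Int × String × String)) (corpses : List (Int × String × String)) (items_sorted : List (Int × String × String)) (features : List (Int × String)) : List String :=
  let lines : List String := []
  let lines := if monsters.isEmpty then lines else
    (lines ++ ["Monsters:"]) ++ monsters.map pvFmt3
  let lines := if corpses.isEmpty then lines else
    ((if lines.isEmpty then lines else lines ++ [""]) ++ ["Corpses:"]) ++ corpses.map pvFmt3
  let lines := if items_sorted.isEmpty then lines else
    ((if lines.isEmpty then lines else lines ++ [""]) ++ ["Items:"]) ++ items_sorted.map pvFmt3
  let lines := if features.isEmpty then lines else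
    ((if lines.isEmpty then lines else lines ++ [""]) ++ ["Features:"]) ++ features.map pvFmt2
  if lines.isEmpty then lines ++ ["Nothing of interest."] else lines

-- ===== PORT B =====
-- back-to-front recursion of Source B's rec: a block is followed by "" exactly when rest is non-empty
def pvRec : List (String × List String) → List String
  | [] => []
  | (heading, rows) :: sections =>
      let rest := pvRec sections
      if rows.isEmpty then rest
      else (heading :: rows) ++ (if rest.isEmpty then [] else [""]) ++ rest

def build_display_lines_py_alt (monsters : List (Int × String × String)) (corpses : List (Int × String × String)) (items_sorted : List (Int × String × String)) (features : List (Int × String)) : List String :=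
  let lines := pvRec
    [("Monsters:", monsters.map pvFmt3),
     ("Corpses:", corpses.map pvFmt3),
     ("Items:", items_sorted.map pvFmt3),
     ("Features:", features.map pvFmt2)]
  if lines.isEmpty then ["Nothing of interest."] else lines

-- ===== PRECONDITION & SPEC =====
def Spec_build_display_lines_py (monsters : List (Int × String × String)) (corpses : List (Int × String × String)) (items_sorted : List (Int × String × String)) (features : List (Int × String)) (out : List String) : Prop := out = build_display_lines_py_alt monsters corpses items_sorted features
instance (monsters : List (Int × String × String)) (corpses : List (Int × String × String)) (items_sorted : List (Int × String × String)) (features : List (Int × String)) (out : List String) : Decidable (Spec_build_display_lines_py monsters corpses items_sorted features out) := by unfold Spec_build_display_lines_py; infer_instance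

-- ===== CLAIM (what is proved, stated in full; the proofs are below) =====
def Claim_equal_build_display_lines_py : Prop := ∀ (monsters : List (Int × String × String)) (corpses : List (Int × String × String)) (items_sorted : List (Int × String × String)) (features : List (Int × String)), Dom_build_display_lines_py monsters corpses items_sorted features → Spec_build_display_lines_py monsters corpses items_sorted features (build_display_lines_py monsters corpses items_sorted features)

-- ===== LEMMAS AND PROOFS =====

-- ===== VERDICT (by name: the statement is the Claim_ definition above) =====
theorem build_display_lines_py_spec : Claim_equal_build_display_lines_py := by
  intro monsters corpses items_sorted features _
  unfold Spec_build_display_lines_py build_display_lines_py build_display_lines_py_alt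
  cases monsters <;> cases corpses <;> cases items_sorted <;> cases features <;>
    simp [pvRec, List.isEmpty]
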